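-- pv_equiv track=rewrite | github.com/nugongja/Algorithm | 프로그래머스/1/82612. 부족한 금액 계산하기/부족한 금액 계산하기.py | solution
-- ===== SOURCE A (Python) =====
-- def solution(price, money, count):
--     answer = money
--
--     i = 1
--     while count > 0:
--         answer -= price*i
--         count -= 1
--         i += 1
--
--
--     return -answer if answer < 0 else 0
-- ===== SOURCE B (Python) =====
-- def solution(price, money, count):
--     t = count if count > 0 else 0
--     total = price * (t * (t + 1) // 2)
--     short = total - money
--     return short if short > 0 else 0
-- ===== Notes on version B (the rewrite author's own statement) =====
-- stated objective: faster
-- what changed: replaced the O(count) subtraction loop with the closed-form arithmetic-series sum price*count*(count+1)/2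
import Mathlib
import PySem

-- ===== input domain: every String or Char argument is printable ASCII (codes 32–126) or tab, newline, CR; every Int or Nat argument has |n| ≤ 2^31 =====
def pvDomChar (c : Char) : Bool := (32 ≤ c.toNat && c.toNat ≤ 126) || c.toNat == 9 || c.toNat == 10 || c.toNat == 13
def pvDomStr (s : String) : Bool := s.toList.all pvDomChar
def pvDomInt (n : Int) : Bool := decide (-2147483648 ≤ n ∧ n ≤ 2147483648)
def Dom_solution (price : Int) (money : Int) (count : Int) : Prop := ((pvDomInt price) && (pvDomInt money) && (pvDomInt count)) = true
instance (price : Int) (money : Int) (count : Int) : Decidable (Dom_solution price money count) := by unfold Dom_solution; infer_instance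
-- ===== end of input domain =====

-- B replaces A's O(count) subtraction loop by the closed-form arithmetic-series sum (objective: faster).

-- ===== PORT A =====
-- the while loop: state (answer, i, count); runs while count > 0
def solutionLoop (price : Int) (answer : Int) (i : Int) (count : Int) : Int :=
  if _h : count > 0 then solutionLoop price (answer - price * i) (i + 1) (count - 1)
  else answer
termination_by count.toNat
decreasing_by omega

def solution (price : Int) (money : Int) (count : Int) : Int :=
  let answer := solutionLoop price money 1 count
  if answer < 0 then -answer else 0

-- ===== PORT B =====
def solution_alt (price : Int) (money : Int) (count : Int) : Int :=
  let t : Int := if count > 0 then count else 0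
  let total := price * PySem.Int.floordiv (t * (t + 1)) 2
  let short := total - money
  if short > 0 then short else 0

-- ===== PRECONDITION & SPEC =====
def Spec_solution (price : Int) (money : Int) (count : Int) (out : Int) : Prop := out = solution_alt price money count
instance (price : Int) (money : Int) (count : Int) (out : Int) : Decidable (Spec_solution price money count out) := by unfold Spec_solution; infer_instance

-- ===== CLAIM (what is proved, stated in full; the proofs are below) =====
def Claim_equal_solution : Prop := ∀ (price : Int) (money : Int) (count : Int), Dom_solution price money count → Spec_solution price money count (solution price money count)

-- ===== LEMMAS AND PROOFS =====

-- the arithmetic sum the loop subtracts: sumG i c = i + (i+1) + … + (i+c-1)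
def sumG (i : Int) (c : Int) : Int :=
  if _h : c > 0 then i + sumG (i + 1) (c - 1) else 0
termination_by c.toNat
decreasing_by omega

theorem solutionLoop_eq (price : Int) : ∀ (n : Nat) (c : Int), c.toNat = n →
    ∀ (answer i : Int), solutionLoop price answer i c = answer - price * sumG i c := by
  intro n
  induction n with
  | zero =>
    intro c hc answer i
    have h : ¬ c > 0 := by omega
    rw [solutionLoop, sumG]
    simp [h]
  | succ n ih =>
    intro c hc answer i
    have h : c > 0 := by omega
    rw [solutionLoop, sumG]
    simp only [h, dif_pos]
    rw [ih (c - 1) (by omega)]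
    ring

theorem sumG_closed : ∀ (n : Nat) (c : Int), c.toNat = n → ∀ (i : Int),
    2 * sumG i c = (if c > 0 then c else 0) * ((if c > 0 then c else 0) + 2 * i - 1) := by
  intro n
  induction n with
  | zero =>
    intro c hc i
    have h : ¬ c > 0 := by omega
    rw [sumG]
    simp [h]
  | succ n ih =>
    intro c hc i
    have h : c > 0 := by omega
    rw [sumG]
    simp only [h, if_pos, dif_pos]
    rw [mul_add, ih (c - 1) (by omega)]
    by_cases h1 : c - 1 > 0
    · simp only [h1, if_pos]; ring
    · have : c = 1 := by omega
      subst this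
      norm_num

theorem solution_spec : Claim_equal_solution := by
  intro price money count _
  unfold Spec_solution solution solution_alt
  dsimp only
  rw [solutionLoop_eq price count.toNat count rfl]
  set t : Int := if count > 0 then count else 0 with ht
  have hsum : 2 * sumG 1 count = t * (t + 1) := by
    rw [sumG_closed count.toNat count rfl 1, ← ht]; ring
  have hfd : PySem.Int.floordiv (t * (t + 1)) 2 = sumG 1 count := by
    rw [← hsum, PySem.Int.floordiv_eq_ediv_of_pos (by norm_num)]
    exact Int.mul_ediv_cancel_left _ (by norm_num)
  rw [hfd]
  set S := sumG 1 count
  by_cases h : money - price * S < 0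
  · simp only [h, if_pos]
    have : price * S - money > 0 := by omega
    simp only [this, if_pos]
    ring
  · have h2 : ¬ price * S - money > 0 := by omega
    simp only [h, if_neg, not_false_iff, h2]
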